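-- pv_equiv track=rewrite | github.com/grahama1970/agent-skills | skills/common/taxonomy.py | _get_episodic_associations
-- ===== SOURCE A (Python) =====
-- from typing import Any, Dict, List, Optional, Set, Tuple, TypedDict
--
-- _HMT_AVAILABLE = False
--
-- def _get_episodic_associations(bridges: List[str], text: str = "") -> List[str]:
--     """Get episodic associations for bridges."""
--     associations = []
--
--     if _HMT_AVAILABLE:
--         for episode_name, episode_data in EPISODIC_ASSOCIATIONS.items():
--             episode_bridge = episode_data.get("bridge", "")
--             if episode_bridge in bridges:
--                 if episode_name not in associations:
--                     associations.append(episode_name)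
--                 continue
--
--             # Match by music indicators in text
--             for indicator in episode_data.get("music_indicators", []):
--                 if indicator.lower() in text.lower():
--                     if episode_name not in associations:
--                         associations.append(episode_name)
--                     break
--     else:
--         # Fallback episode map
--         episode_map = {
--             "Precision": ["Iron_Cage", "Horus_Primarch"],
--             "Resilience": ["Siege_of_Terra", "Emperor_Throne"],
--             "Fragility": ["Webway_Collapse", "Sanguinius_Fall"],
--             "Corruption": ["Davin_Corruption", "Isstvan_Betrayal"],
--             "Loyalty": ["Mournival_Oath"],
--             "Stealth": ["Alpharius_Deception"],
--         }
--         for bridge in bridges: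
--             associations.extend(episode_map.get(bridge, []))
--
--     return list(set(associations))
-- ===== SOURCE B (Python) =====
-- # Inverted index: each episode code maps to its bridge name; filter the fixed
-- # code list by membership of its bridge in set(bridges).
-- _CODE_TO_BRIDGE = [
--     ("Iron_Cage", "Precision"),
--     ("Horus_Primarch", "Precision"),
--     ("Siege_of_Terra", "Resilience"),
--     ("Emperor_Throne", "Resilience"),
--     ("Webway_Collapse", "Fragility"),
--     ("Sanguinius_Fall", "Fragility"),
--     ("Davin_Corruption", "Corruption"),
--     ("Isstvan_Betrayal", "Corruption"),
--     ("Mournival_Oath", "Loyalty"),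
--     ("Alpharius_Deception", "Stealth"),
-- ]
--
-- def _get_episodic_associations(bridges, text=""):
--     """Get episodic associations for bridges (fallback table; HMT branch is dead)."""
--     wanted = set(bridges)
--     return list({code for code, bridge in _CODE_TO_BRIDGE if bridge in wanted})
-- ===== Notes on version B (the rewrite author's own statement) =====
-- stated objective: alternative
-- what changed: B replaces A's per-bridge dict lookups (looping the input and extending with episode_map.get(bridge, [])) by an inverted index: a fixed (code, bridge) list filtered once by membership of its bridge in set(bridges); the dead _HMT_AVAILABLE branch is dropped.
import Mathlib
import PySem

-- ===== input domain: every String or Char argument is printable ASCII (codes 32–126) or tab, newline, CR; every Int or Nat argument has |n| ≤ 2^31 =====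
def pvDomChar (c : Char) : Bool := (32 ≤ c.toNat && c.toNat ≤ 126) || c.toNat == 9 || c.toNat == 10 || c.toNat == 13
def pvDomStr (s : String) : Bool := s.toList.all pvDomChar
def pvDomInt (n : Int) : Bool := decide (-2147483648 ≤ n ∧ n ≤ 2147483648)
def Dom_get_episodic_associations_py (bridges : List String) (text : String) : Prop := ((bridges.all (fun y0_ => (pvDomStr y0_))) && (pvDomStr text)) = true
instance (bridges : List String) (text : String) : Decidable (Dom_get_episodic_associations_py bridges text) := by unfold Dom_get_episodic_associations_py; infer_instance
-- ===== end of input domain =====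

-- B replaces A's per-bridge dict lookups by an inverted index: a fixed (code, bridge) list
-- filtered once by set-membership of its bridge; the dead _HMT_AVAILABLE branch is dropped.
-- Python's list(set(...)) has no defined order; both ports return the sorted distinct
-- elements (the return is compared as a set).

-- ===== PORT A =====
-- _HMT_AVAILABLE is False, so only the else-branch runs:
-- for each bridge, extend associations by episode_map.get(bridge, []).
def get_episodic_associations_py (bridges : List String) (_text : String) : List String :=
  let episode_map : PySem.Dict String (List String) := PySem.Dict.mk
    [("Precision", ["Iron_Cage", "Horus_Primarch"]),
     ("Resilience", ["Siege_of_Terra", "Emperor_Throne"]),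
     ("Fragility", ["Webway_Collapse", "Sanguinius_Fall"]),
     ("Corruption", ["Davin_Corruption", "Isstvan_Betrayal"]),
     ("Loyalty", ["Mournival_Oath"]),
     ("Stealth", ["Alpharius_Deception"])]
  let associations : List String :=
    bridges.foldl (fun acc bridge => acc ++ episode_map.getD bridge []) []
  PySem.List.sorted (PySem.Set.ofList associations) (fun x => x) false

-- ===== PORT B =====
-- the inverted index: episode code -> bridge name, a fixed literal of Source B
def pvCodeToBridge : List (String × String) :=
  [("Iron_Cage", "Precision"),
   ("Horus_Primarch", "Precision"),
   ("Siege_of_Terra", "Resilience"),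
   ("Emperor_Throne", "Resilience"),
   ("Webway_Collapse", "Fragility"),
   ("Sanguinius_Fall", "Fragility"),
   ("Davin_Corruption", "Corruption"),
   ("Isstvan_Betrayal", "Corruption"),
   ("Mournival_Oath", "Loyalty"),
   ("Alpharius_Deception", "Stealth")]

def get_episodic_associations_py_alt (bridges : List String) (_text : String) : List String :=
  let wanted : PySem.Set String := PySem.Set.ofList bridges
  PySem.List.sorted
    (PySem.Set.ofList ((pvCodeToBridge.filter (fun q => wanted.contains q.2)).map (·.1)))
    (fun x => x) false

-- ===== PRECONDITION & SPEC =====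
def Spec_get_episodic_associations_py (bridges : List String) (text : String) (out : List String) : Prop := out = get_episodic_associations_py_alt bridges text
instance (bridges : List String) (text : String) (out : List String) : Decidable (Spec_get_episodic_associations_py bridges text out) := by unfold Spec_get_episodic_associations_py; infer_instance

-- ===== CLAIM (what is proved, stated in full; the proofs are below) =====
def Claim_equal_get_episodic_associations_py : Prop := ∀ (bridges : List String) (text : String), Dom_get_episodic_associations_py bridges text → Spec_get_episodic_associations_py bridges text (get_episodic_associations_py bridges text)

-- ===== LEMMAS AND PROOFS =====

-- membership in a literal dict's getD, when the keys are distinct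
theorem mem_getD_mk_iff (l : List (String × List String)) (hnd : (l.map (·.1)).Nodup)
    (b x : String) :
    x ∈ (PySem.Dict.mk l).getD b [] ↔ ∃ cs, (b, cs) ∈ l ∧ x ∈ cs := by
  induction l with
  | nil => simp [PySem.Dict.getD, PySem.Dict.get?]
  | cons p t ih =>
    obtain ⟨k, v⟩ := p
    simp only [List.map_cons, List.nodup_cons] at hnd
    by_cases hk : k = b
    · subst hk
      rw [PySem.Dict.getD_eq_get?_getD, PySem.Dict.get?_mk_cons]
      simp only [beq_self_eq_true, if_pos, Option.getD_some]
      constructor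
      · intro hx; exact ⟨v, by simp, hx⟩
      · rintro ⟨cs, hcs, hx⟩
        rcases List.mem_cons.mp hcs with h | h
        · cases h; exact hx
        · exact absurd (List.mem_map.mpr ⟨(k, cs), h, rfl⟩) hnd.1
    · rw [PySem.Dict.getD_eq_get?_getD, PySem.Dict.get?_mk_cons]
      simp only [beq_iff_eq, hk, if_neg, not_false_iff]
      rw [← PySem.Dict.getD_eq_get?_getD, ih hnd.2]
      constructor
      · rintro ⟨cs, hcs, hx⟩; exact ⟨cs, List.mem_cons_of_mem _ hcs, hx⟩
      · rintro ⟨cs, hcs, hx⟩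
        rcases List.mem_cons.mp hcs with h | h
        · exact absurd (congrArg Prod.fst h).symm hk
        · exact ⟨cs, h, hx⟩

-- the episode table A's dict is built from, named here only for the proofs
def pvEpisodeTable : List (String × List String) :=
  [("Precision", ["Iron_Cage", "Horus_Primarch"]),
   ("Resilience", ["Siege_of_Terra", "Emperor_Throne"]),
   ("Fragility", ["Webway_Collapse", "Sanguinius_Fall"]),
   ("Corruption", ["Davin_Corruption", "Isstvan_Betrayal"]),
   ("Loyalty", ["Mournival_Oath"]),
   ("Stealth", ["Alpharius_Deception"])]

theorem nodup_keys_table : (pvEpisodeTable.map (·.1)).Nodup := by decide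

-- pvCodeToBridge is exactly the transpose of pvEpisodeTable
theorem table_transpose (k x : String) :
    (∃ cs, (k, cs) ∈ pvEpisodeTable ∧ x ∈ cs) ↔ (x, k) ∈ pvCodeToBridge := by
  simp only [pvEpisodeTable, pvCodeToBridge, List.mem_cons, List.not_mem_nil,
    or_false, Prod.mk.injEq]
  constructor
  · rintro ⟨cs, h, hx⟩
    rcases h with ⟨hk, rfl⟩ | ⟨hk, rfl⟩ | ⟨hk, rfl⟩ | ⟨hk, rfl⟩ | ⟨hk, rfl⟩ | ⟨hk, rfl⟩ <;>
      simp_all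
  · rintro (⟨rfl, rfl⟩ | ⟨rfl, rfl⟩ | ⟨rfl, rfl⟩ | ⟨rfl, rfl⟩ | ⟨rfl, rfl⟩ |
            ⟨rfl, rfl⟩ | ⟨rfl, rfl⟩ | ⟨rfl, rfl⟩ | ⟨rfl, rfl⟩ | ⟨rfl, rfl⟩) <;>
      exact ⟨_, by tauto, by simp⟩

-- the two distinct-element pools have the same members
theorem assoc_mem_iff (bridges : List String) (x : String) :
    (x ∈ bridges.foldl
        (fun acc bridge => acc ++ (PySem.Dict.mk pvEpisodeTable).getD bridge []) []) ↔
    x ∈ (pvCodeToBridge.filter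
        (fun q => (PySem.Set.ofList bridges).contains q.2)).map (·.1) := by
  rw [PySem.List.foldl_append_eq_flatMap, List.nil_append]
  simp only [List.mem_flatMap, List.mem_map, List.mem_filter]
  constructor
  · rintro ⟨b, hb, hx⟩
    rcases (mem_getD_mk_iff pvEpisodeTable nodup_keys_table b x).mp hx with ⟨cs, hcs, hxc⟩
    exact ⟨(x, b), ⟨(table_transpose b x).mp ⟨cs, hcs, hxc⟩,
      by simpa [PySem.Set.contains_iff, PySem.Set.mem_ofList] using hb⟩, rfl⟩
  · rintro ⟨⟨c, b⟩, ⟨hmem, hc⟩, rfl⟩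
    refine ⟨b, ?_, ?_⟩
    · simpa [PySem.Set.contains_iff, PySem.Set.mem_ofList] using hc
    · rcases (table_transpose b c).mpr hmem with ⟨cs, hcs, hxc⟩
      exact (mem_getD_mk_iff pvEpisodeTable nodup_keys_table b c).mpr ⟨cs, hcs, hxc⟩

-- ===== VERDICT (by name: the statement is the Claim_ definition above) =====
theorem get_episodic_associations_py_spec : Claim_equal_get_episodic_associations_py := by
  intro bridges text _
  unfold Spec_get_episodic_associations_py get_episodic_associations_py get_episodic_associations_py_alt
  apply (PySem.List.sorted_id_eq_sorted_id_iff_perm _ _).mpr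
  apply (List.perm_ext_iff_of_nodup (PySem.Set.nodup_ofList _) (PySem.Set.nodup_ofList _)).mpr
  intro x
  simp only [PySem.Set.mem_ofList]
  exact assoc_mem_iff bridges x
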